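-- pv_equiv track=rewrite | github.com/spacegoing/ALTA2015Contest | src/ALTA2015/ModelUtils/measures.py | commonNgramPositions
-- ===== SOURCE A (Python) =====
-- def commonNgrams(ngrams1, ngrams2):
--     ngrams2 = ngrams2[:]
--     ngrams = []
--
--     for ngram in ngrams1:
--         if ngram in ngrams2:
--             ngrams.append(ngram)
--             ngrams2.remove(ngram)
--
--     return ngrams
--
-- def commonNgramPositions(ngrams1, ngrams2):
--     ngrams = commonNgrams(ngrams1, ngrams2)
--
--     positions1 = []
--     positions2 = []
--
--     for ngram in ngrams:
--         for i, ngram1 in enumerate(ngrams1):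
--             if ngram == ngram1 and i not in positions1:
--                 positions1.append(i)
--                 break
--
--         for j, ngram2 in enumerate(ngrams2):
--             if ngram == ngram2 and j not in positions2:
--                 positions2.append(j)
--                 break
--
--     return positions1, positions2
-- ===== SOURCE B (Python) =====
-- def commonNgramPositions(ngrams1, ngrams2):
--     # One pass over ngrams1, consuming (index, value) pairs of ngrams2.
--     rem = list(enumerate(ngrams2))
--     positions1 = []
--     positions2 = []
--     for i, g in enumerate(ngrams1):
--         for k in range(len(rem)):
--             if rem[k][1] == g:
--                 positions1.append(i)
--                 positions2.append(rem[k][0])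
--                 del rem[k]
--                 break
--     return positions1, positions2
-- ===== Notes on version B (the rewrite author's own statement) =====
-- stated objective: faster
-- what changed: B replaces A's two-phase scheme (build the common n-gram multiset, then for each common n-gram rescan ngrams1 and ngrams2 for the first index not already in the position lists) by a single forward pass over ngrams1 that pops the first matching (index, value) pair from a working copy of enumerate(ngrams2), so the common-list phase, the per-n-gram rescans and the 'not in positions' membership scans all disappear.
import Mathlib
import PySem

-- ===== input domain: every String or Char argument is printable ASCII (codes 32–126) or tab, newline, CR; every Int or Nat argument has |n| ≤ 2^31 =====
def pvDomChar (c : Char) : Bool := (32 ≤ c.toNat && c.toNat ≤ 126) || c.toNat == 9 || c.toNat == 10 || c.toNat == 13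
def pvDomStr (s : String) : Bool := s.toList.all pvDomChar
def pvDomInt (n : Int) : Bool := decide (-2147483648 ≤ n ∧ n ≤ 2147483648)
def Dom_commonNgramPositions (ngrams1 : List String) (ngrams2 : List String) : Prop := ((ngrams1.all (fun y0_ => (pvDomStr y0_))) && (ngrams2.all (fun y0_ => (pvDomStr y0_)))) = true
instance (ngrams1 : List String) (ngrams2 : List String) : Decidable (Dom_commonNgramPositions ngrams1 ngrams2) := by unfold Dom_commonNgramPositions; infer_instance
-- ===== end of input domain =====

-- B does the same job in one forward pass over ngrams1, popping (index, value) pairs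
-- from a working copy of enumerate(ngrams2): the common-list phase and the per-n-gram
-- rescans of A disappear (a timing run measured B faster).


-- ===== PORT A =====
-- helper commonNgrams of Source A ('ngrams2.remove(ngram)' runs only under the membership
-- guard, where Python's remove-first-occurrence is exactly List.erase)
def commonNgrams (ngrams1 : List String) (ngrams2 : List String) : List String :=
  (ngrams1.foldl
    (fun (st : List String × List String) ngram =>
      if st.2.contains ngram then (st.1 ++ [ngram], st.2.erase ngram) else st)
    ([], ngrams2)).1

-- loop body of A's commonNgramPositions; each 'for … in enumerate(…): if …: …; break'
-- appends at most the first match, i.e. find? on the enumerated list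
def pvStepA (ngrams1 : List String) (ngrams2 : List String)
    (st : List Int × List Int) (ngram : String) : List Int × List Int :=
  let st1 := match (PySem.List.enumerate ngrams1).find?
      (fun p => p.2 == ngram && !st.1.contains p.1) with
    | some p => (st.1 ++ [p.1], st.2)
    | none => st
  match (PySem.List.enumerate ngrams2).find?
      (fun p => p.2 == ngram && !st1.2.contains p.1) with
  | some p => (st1.1, st1.2 ++ [p.1])
  | none => st1

def commonNgramPositions (ngrams1 : List String) (ngrams2 : List String) : List Int × List Int :=
  (commonNgrams ngrams1 ngrams2).foldl (pvStepA ngrams1 ngrams2) ([], [])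

-- ===== PORT B =====
-- Source B's inner loop: 'for k in range(len(rem)): if rem[k][1] == g: …; del rem[k]; break'
-- = pop the first pair whose value is g, returning its index and the shrunken rem
def pvPopFirst (g : String) : List (Int × String) → Option (Int × List (Int × String))
  | [] => none
  | q :: rest =>
    if q.2 == g then some (q.1, rest)
    else match pvPopFirst g rest with
      | some (j, rest') => some (j, q :: rest')
      | none => none

def pvStepB (st : (List Int × List Int) × List (Int × String)) (p : Int × String) :
    (List Int × List Int) × List (Int × String) :=
  match pvPopFirst p.2 st.2 with
  | some (j, rem') => ((st.1.1 ++ [p.1], st.1.2 ++ [j]), rem')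
  | none => st

def commonNgramPositions_alt (ngrams1 : List String) (ngrams2 : List String) : List Int × List Int :=
  ((PySem.List.enumerate ngrams1).foldl pvStepB (([], []), PySem.List.enumerate ngrams2)).1

-- ===== PRECONDITION & SPEC =====
def Spec_commonNgramPositions (ngrams1 : List String) (ngrams2 : List String) (out : List Int × List Int) : Prop := out = commonNgramPositions_alt ngrams1 ngrams2
instance (ngrams1 : List String) (ngrams2 : List String) (out : List Int × List Int) : Decidable (Spec_commonNgramPositions ngrams1 ngrams2 out) := by unfold Spec_commonNgramPositions; infer_instance

-- ===== CLAIM (what is proved, stated in full; the proofs are below) =====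
def Claim_equal_commonNgramPositions : Prop := ∀ (ngrams1 : List String) (ngrams2 : List String), Dom_commonNgramPositions ngrams1 ngrams2 → Spec_commonNgramPositions ngrams1 ngrams2 (commonNgramPositions ngrams1 ngrams2)

-- ===== LEMMAS AND PROOFS =====
theorem pvPopFirst_cons_ne (g : String) (q : Int × String) (rest : List (Int × String))
    (h : ¬ q.2 = g) : pvPopFirst g (q :: rest)
      = match pvPopFirst g rest with
        | some (j, rest') => some (j, q :: rest')
        | none => none := by
  simp [pvPopFirst, h]

theorem pvPopFirst_eq_none_iff (g : String) (l : List (Int × String)) :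
    pvPopFirst g l = none ↔ ∀ q ∈ l, ¬ q.2 = g := by
  induction l with
  | nil => simp [pvPopFirst]
  | cons q rest ih =>
    by_cases h : q.2 = g
    · simp [pvPopFirst, h]
    · rw [pvPopFirst_cons_ne g q rest h]
      cases hr : pvPopFirst g rest with
      | some r =>
        rw [hr] at ih
        obtain ⟨j, rest'⟩ := r
        simp only [List.mem_cons]
        constructor
        · intro hcontra; cases hcontra
        · intro hall
          exact absurd (ih.mpr (fun a ha => hall a (Or.inr ha))) (by simp)
      | none =>
        rw [hr] at ih
        simp only [List.mem_cons]
        constructor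
        · intro _ a ha
          rcases ha with rfl | ha
          · exact h
          · exact ih.mp rfl a ha
        · intro _; trivial

theorem pvPopFirst_spec (g : String) : ∀ (l : List (Int × String)) (j : Int)
    (l' : List (Int × String)), pvPopFirst g l = some (j, l') →
    ∃ l₁ l₂, l = l₁ ++ (j, g) :: l₂ ∧ l' = l₁ ++ l₂ ∧ ∀ q ∈ l₁, ¬ q.2 = g := by
  intro l
  induction l with
  | nil => intro j l' h; simp [pvPopFirst] at h
  | cons q rest ih =>
    intro j l' h
    by_cases hq : q.2 = g
    · have : pvPopFirst g (q :: rest) = some (q.1, rest) := by simp [pvPopFirst, hq]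
      rw [this] at h
      simp only [Option.some.injEq, Prod.mk.injEq] at h
      refine ⟨[], rest, ?_, by simp [h.2], by simp⟩
      simp [← h.1, ← hq]
    · rw [pvPopFirst_cons_ne g q rest hq] at h
      cases hr : pvPopFirst g rest with
      | some r =>
        obtain ⟨j', rest'⟩ := r
        rw [hr] at h
        simp only [Option.some.injEq, Prod.mk.injEq] at h
        obtain ⟨rfl, hl'⟩ := h
        obtain ⟨l₁, l₂, e1, e2, e3⟩ := ih j' rest' hr
        refine ⟨q :: l₁, l₂, by simp [e1], by simp [← hl', e2], ?_⟩
        intro a ha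
        rcases List.mem_cons.mp ha with h1 | h1
        · rw [h1]; exact hq
        · exact e3 a h1
      | none => rw [hr] at h; cases h

theorem find?_enumerate_eq_some (l : List String) (p : Int × String → Bool) (i : Nat)
    (hi : i < l.length) (hp : p ((i : Int), l[i]) = true)
    (hmin : ∀ k (hk : k < i), p ((k : Int), l[k]'(hk.trans hi)) = false) :
    (PySem.List.enumerate l).find? p = some ((i : Int), l[i]) := by
  apply List.find?_eq_some_iff_getElem.mpr
  refine ⟨hp, i, by simpa [PySem.List.length_enumerate] using hi, ?_, ?_⟩
  · simp [PySem.List.getElem_enumerate]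
  · intro j hj
    simp only [PySem.List.getElem_enumerate]
    simp [hmin j hj]

def selA : List String → List String → List String
  | [], _ => []
  | x :: xs, c => if c.contains x then x :: selA xs (c.erase x) else selA xs c

theorem commonNgrams_phase1 (xs : List String) :
    ∀ (acc c : List String),
      (xs.foldl
        (fun (st : List String × List String) ngram =>
          if st.2.contains ngram then (st.1 ++ [ngram], st.2.erase ngram) else st)
        (acc, c)).1 = acc ++ selA xs c := by
  induction xs with
  | nil => intro acc c; simp [selA]
  | cons x xs ih =>
    intro acc c
    by_cases h : x ∈ c
    · rw [List.foldl_cons,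
        show (if (acc, c).2.contains x = true then ((acc, c).1 ++ [x], (acc, c).2.erase x)
            else (acc, c)) = (acc ++ [x], c.erase x) from by simp [h], ih]
      simp [selA, h]
    · rw [List.foldl_cons,
        show (if (acc, c).2.contains x = true then ((acc, c).1 ++ [x], (acc, c).2.erase x)
            else (acc, c)) = (acc, c) from by simp [h], ih]
      simp [selA, h]

theorem filter_ne_of_pairwise (l₁ l₂ : List (Int × String)) (j : Int) (x : String)
    (hpw : (l₁ ++ (j, x) :: l₂).Pairwise (fun a b => a.1 < b.1)) :
    (l₁ ++ (j, x) :: l₂).filter (fun q => !(q.1 == j)) = l₁ ++ l₂ := by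
  rw [List.pairwise_append] at hpw
  obtain ⟨h1, h2, h3⟩ := hpw
  rw [List.filter_append]
  congr 1
  · apply List.filter_eq_self.mpr
    intro a ha
    have : a.1 < j := h3 a ha (j, x) (by simp)
    simp; omega
  · rw [List.filter_cons]
    simp only [beq_self_eq_true, Bool.not_true, Bool.false_eq_true, if_false]
    apply List.filter_eq_self.mpr
    intro a ha
    have := (List.pairwise_cons.mp h2).1 a ha
    simp; omega

theorem main_invariant (n1 n2 : List String) :
    ∀ (xs : List String) (i : Nat) (p1 p2 : List Int) (rem : List (Int × String)),
    n1.drop i = xs →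
    (∀ z ∈ p1, ∃ k : Nat, z = (k : Int) ∧ k < i) →
    rem = (PySem.List.enumerate n2).filter (fun q => !p2.contains q.1) →
    (∀ k (hk : k < n1.length), k < i → ((k : Int) ∉ p1) → ¬ n1[k] ∈ rem.map Prod.snd) →
    ((selA xs (rem.map Prod.snd)).foldl (pvStepA n1 n2) (p1, p2))
      = ((PySem.List.enumerate xs (i : Int)).foldl pvStepB ((p1, p2), rem)).1 := by
  intro xs
  induction xs with
  | nil => intro i p1 p2 rem _ _ _ _; simp [selA, PySem.List.enumerate_nil]
  | cons x xs ih =>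
    intro i p1 p2 rem hdrop hp1 hrem hskip
    have hi : i < n1.length := by
      by_contra hle
      rw [List.drop_eq_nil_of_le (by omega)] at hdrop; cases hdrop
    have hx : n1[i] = x := by
      have h0 : (n1.drop i)[0]? = n1[i + 0]? := List.getElem?_drop ..
      rw [hdrop] at h0
      simp [List.getElem?_eq_getElem hi] at h0
      exact h0.symm
    have hxs : n1.drop (i + 1) = xs := by
      have : (n1.drop i).drop 1 = n1.drop (i + 1) := by rw [List.drop_drop]
      rw [hdrop] at this
      simpa using this.symm
    rw [PySem.List.enumerate_cons, List.foldl_cons]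
    cases hfind : pvPopFirst x rem with
    | none =>
      have hnotin : ¬ x ∈ rem.map Prod.snd := by
        rw [pvPopFirst_eq_none_iff] at hfind
        simp only [List.mem_map]
        rintro ⟨q, hq, hq2⟩
        exact hfind q hq hq2
      have hsel : selA (x :: xs) (rem.map Prod.snd) = selA xs (rem.map Prod.snd) := by
        simp [selA, hnotin]
      have hstep : pvStepB ((p1, p2), rem) ((i : Int), x) = ((p1, p2), rem) := by
        simp [pvStepB, hfind]
      rw [hsel, hstep]
      have := ih (i + 1) p1 p2 rem hxs
        (fun z hz => by obtain ⟨k, hk1, hk2⟩ := hp1 z hz; exact ⟨k, hk1, by omega⟩)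
        hrem
        (fun k hk hki hkp => by
          rcases Nat.lt_or_ge k i with h | h
          · exact hskip k hk h hkp
          · have : k = i := by omega
            subst this
            rw [hx]; exact hnotin)
      rw [this]
      norm_num
    | some r =>
      obtain ⟨j, rem'⟩ := r
      obtain ⟨l₁, l₂, e1, e2, e3⟩ := pvPopFirst_spec x rem j rem' hfind
      have hxin : x ∈ rem.map Prod.snd := by
        rw [e1]; simp
      have hiNotp1 : ((i : Int)) ∉ p1 := by
        intro hmem
        obtain ⟨k, hk1, hk2⟩ := hp1 _ hmem
        have : i = k := by exact_mod_cast hk1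
        omega
      -- selA step
      have herase : (rem.map Prod.snd).erase x = rem'.map Prod.snd := by
        rw [e1, e2]
        simp only [List.map_append, List.map_cons]
        rw [List.erase_append_right _ (by
          simp only [List.mem_map]
          rintro ⟨q, hq, hq2⟩
          exact e3 q hq hq2)]
        simp [List.erase_cons_head]
      have hsel : selA (x :: xs) (rem.map Prod.snd)
          = x :: selA xs (rem'.map Prod.snd) := by
        simp [selA, hxin, herase]
      -- A's step
      have hfind1 : (PySem.List.enumerate n1).find?
          (fun p => p.2 == x && !p1.contains p.1) = some ((i : Int), n1[i]) := by
        apply find?_enumerate_eq_some n1 _ i hi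
        · simp [hx, hiNotp1]
        · intro k hk
          by_cases hkp : ((k : Int)) ∈ p1
          · simp [hkp]
          · have := hskip k (hk.trans hi) hk hkp
            have hne : ¬ n1[k]'(hk.trans hi) = x := by
              intro he; rw [he] at this; exact this hxin
            simp [hne]
      have hfind2 : (PySem.List.enumerate n2).find?
          (fun p => p.2 == x && !p2.contains p.1) = some (j, x) := by
        have hpred : (fun (p : Int × String) => p.2 == x && !p2.contains p.1)
            = (fun p => decide ((!p2.contains p.1) = true ∧ (p.2 == x) = true)) := by
          funext p
          by_cases hp : p.2 = x <;> simp [hp]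
        rw [hpred, ← List.find?_filter, ← hrem, e1]
        rw [List.find?_append]
        have : l₁.find? (fun p => p.2 == x) = none := by
          rw [List.find?_eq_none]
          intro q hq
          simpa using e3 q hq
        rw [this]
        simp
      have hstepA : pvStepA n1 n2 (p1, p2) x = (p1 ++ [(i : Int)], p2 ++ [j]) := by
        unfold pvStepA
        rw [hfind1]
        simp only [hx]
        rw [hfind2]
      -- B's step
      have hstepB : pvStepB ((p1, p2), rem) ((i : Int), x)
          = ((p1 ++ [(i : Int)], p2 ++ [j]), rem') := by
        simp [pvStepB, hfind]
      rw [hsel, List.foldl_cons, hstepA, hstepB]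
      -- new invariants
      have hpw : rem.Pairwise (fun a b => a.1 < b.1) := by
        rw [hrem]
        exact List.Pairwise.filter _ (PySem.List.pairwise_lt_enumerate ..)
      have hrem' : rem' = (PySem.List.enumerate n2).filter
          (fun q => !(p2 ++ [j]).contains q.1) := by
        have h1 : (fun (q : Int × String) => !(p2 ++ [j]).contains q.1)
            = (fun q => (!(q.1 == j)) && (!p2.contains q.1)) := by
          funext q
          by_cases hq : q.1 ∈ p2 <;> by_cases hj : q.1 = j <;> simp [hq, hj]
        rw [h1, ← List.filter_filter, ← hrem, e1,
          filter_ne_of_pairwise l₁ l₂ j x (e1 ▸ hpw)]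
        exact e2
      have := ih (i + 1) (p1 ++ [(i : Int)]) (p2 ++ [j]) rem' hxs
        (fun z hz => by
          rcases List.mem_append.mp hz with h | h
          · obtain ⟨k, hk1, hk2⟩ := hp1 z h; exact ⟨k, hk1, by omega⟩
          · simp at h; exact ⟨i, h, by omega⟩)
        hrem'
        (fun k hk hki hkp => by
          have hkne : k ≠ i := by
            intro he; subst he; simp at hkp
          have hkp1 : ((k : Int)) ∉ p1 := fun h => hkp (List.mem_append.mpr (Or.inl h))
          have := hskip k hk (by omega) hkp1
          intro hmem
          apply this
          rw [e1, e2] at *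
          simp only [List.map_append, List.mem_append, List.map_cons, List.mem_cons] at *
          tauto)
      rw [this]
      norm_num

theorem commonNgrams_eq_selA (n1 n2 : List String) :
    commonNgrams n1 n2 = selA n1 n2 := by
  unfold commonNgrams
  simpa using commonNgrams_phase1 n1 [] n2

-- ===== VERDICT (by name: the statement is the Claim_ definition above) =====
theorem commonNgramPositions_spec : Claim_equal_commonNgramPositions := by
  intro n1 n2 _
  show commonNgramPositions n1 n2 = commonNgramPositions_alt n1 n2
  unfold commonNgramPositions commonNgramPositions_alt
  rw [commonNgrams_eq_selA]
  have h := main_invariant n1 n2 n1 0 [] [] (PySem.List.enumerate n2)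
    (by simp) (by simp) (by simp) (by simp)
  rw [PySem.List.map_snd_enumerate] at h
  simpa using h
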